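-- pv_equiv track=rewrite | github.com/NoahPeres/ti4-ai | src/ti4/performance/cache.py | _calculate_shortest_path
-- ===== SOURCE A (Python) =====
-- def _calculate_shortest_path(
--     start_system: str, end_system: str, max_distance: int
-- ) -> list[str]:
--     """Calculate the shortest path between two systems using BFS."""
--     if start_system == end_system:
--         return [start_system]
--
--     # Simple BFS implementation for pathfinding
--     from collections import deque
--
--     queue = deque([(start_system, [start_system])])
--
--     while queue:
--         current_system, path = queue.popleft()
--
--         if len(path) > max_distance:
--             continue
--
--         # Get adjacent systems (this would need to be implemented based on galaxy structure)
--         # For now, return a simple path for testing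
--         if len(path) < max_distance:
--             # This is a simplified implementation - in reality would check actual adjacencies
--             if current_system != end_system:
--                 next_path = path + [end_system]
--                 if len(next_path) <= max_distance:
--                     return next_path
--
--     # No path found within max_distance
--     return []
-- ===== SOURCE B (Python) =====
-- def _calculate_shortest_path(
--     start_system: str, end_system: str, max_distance: int
-- ) -> list[str]:
--     """Direct conditional form of the stub pathfinder: the BFS never explores,
--     so the result depends only on equality and the max_distance bound."""
--     if start_system == end_system:
--         return [start_system]
--     if max_distance >= 2:
--         return [start_system, end_system]
--     return []
-- ===== Notes on version B (the rewrite author's own statement) =====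
-- stated objective: simpler
-- what changed: Replaced the deque/BFS scaffolding (which never enqueues neighbours and so runs at most one iteration) with a direct three-way conditional on equality and max_distance.
import Mathlib
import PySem

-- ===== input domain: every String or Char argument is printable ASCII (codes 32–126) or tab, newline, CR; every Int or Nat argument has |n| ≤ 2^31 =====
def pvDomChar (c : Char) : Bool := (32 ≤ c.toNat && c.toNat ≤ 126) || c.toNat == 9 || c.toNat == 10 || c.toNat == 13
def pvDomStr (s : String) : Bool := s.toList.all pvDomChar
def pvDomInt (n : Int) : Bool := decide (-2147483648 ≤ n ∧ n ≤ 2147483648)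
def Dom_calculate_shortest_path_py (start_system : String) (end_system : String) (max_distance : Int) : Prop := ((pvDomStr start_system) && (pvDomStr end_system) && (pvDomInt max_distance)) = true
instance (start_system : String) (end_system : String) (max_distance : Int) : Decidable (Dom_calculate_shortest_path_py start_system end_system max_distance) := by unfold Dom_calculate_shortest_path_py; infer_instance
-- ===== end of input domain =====

-- ===== PORT A =====
-- B replaces the never-exploring BFS loop with a direct conditional; same return value everywhere.
-- while-loop of A: nothing is ever appended to the queue, so the loop walks down the initial queue list.
def calculate_shortest_path_py_loop (end_system : String) (max_distance : Int) : List (String × List String) → List String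
  | [] => []  -- queue exhausted: return [] after the loop
  | (current_system, path) :: rest =>
    if (path.length : Int) > max_distance then
      calculate_shortest_path_py_loop end_system max_distance rest  -- continue
    else if (path.length : Int) < max_distance then
      if current_system ≠ end_system then
        let next_path := path ++ [end_system]
        if (next_path.length : Int) ≤ max_distance then next_path
        else calculate_shortest_path_py_loop end_system max_distance rest
      else calculate_shortest_path_py_loop end_system max_distance rest
    else calculate_shortest_path_py_loop end_system max_distance rest

def calculate_shortest_path_py (start_system : String) (end_system : String) (max_distance : Int) : List String :=
  if start_system = end_system then [start_system]
  else calculate_shortest_path_py_loop end_system max_distance [(start_system, [start_system])]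

-- ===== PORT B =====
def calculate_shortest_path_py_alt (start_system : String) (end_system : String) (max_distance : Int) : List String :=
  if start_system = end_system then [start_system]
  else if max_distance ≥ 2 then [start_system, end_system]
  else []

-- ===== PRECONDITION & SPEC =====
def Spec_calculate_shortest_path_py (start_system : String) (end_system : String) (max_distance : Int) (out : List String) : Prop := out = calculate_shortest_path_py_alt start_system end_system max_distance
instance (start_system : String) (end_system : String) (max_distance : Int) (out : List String) : Decidable (Spec_calculate_shortest_path_py start_system end_system max_distance out) := by unfold Spec_calculate_shortest_path_py; infer_instance

-- ===== CLAIM (what is proved, stated in full; the proofs are below) =====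
def Claim_equal_calculate_shortest_path_py : Prop := ∀ (start_system : String) (end_system : String) (max_distance : Int), Dom_calculate_shortest_path_py start_system end_system max_distance → Spec_calculate_shortest_path_py start_system end_system max_distance (calculate_shortest_path_py start_system end_system max_distance)

-- ===== LEMMAS AND PROOFS =====

-- ===== VERDICT (by name: the statement is the Claim_ definition above) =====
theorem calculate_shortest_path_py_spec : Claim_equal_calculate_shortest_path_py := by
  intro start_system end_system max_distance _
  unfold Spec_calculate_shortest_path_py calculate_shortest_path_py calculate_shortest_path_py_alt
  by_cases h : start_system = end_system
  · simp [h]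
  · simp only [if_neg h]
    unfold calculate_shortest_path_py_loop
    simp only [List.length_cons, List.length_nil, List.length_append]
    split_ifs with h1 h2 h3 h4 h5 <;> first
      | rfl
      | (exfalso; first | exact h3 h | omega)
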